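-- pv_equiv track=rewrite | github.com/JooJuY/PROGRAMMERS | 2019카카오겨울인턴십/PRO_호텔방배정.py | check
-- ===== SOURCE A (Python) =====
-- def check(rooms, number):
--     if number in rooms:
--         room = check(rooms, rooms[number])
--         rooms[number] = room + 1
--         return room
--     else:
--         rooms[number] = number + 1
--         return number
-- ===== SOURCE B (Python) =====
-- def check(rooms, number):
--     # Iterative: walk the reservation chain to the first free room, then point
--     # every visited room (and the free room itself) at the room after it.
--     node, visited = number, []
--     while (nxt := rooms.get(node)) is not None:
--         visited.append(node)
--         node = nxt
--     rooms.update(dict.fromkeys(visited + [node], node + 1))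
--     return node
-- ===== Notes on version B (the rewrite author's own statement) =====
-- stated objective: idiomatic
-- what changed: Replaces A's recursion with an iterative walrus-loop walk over rooms.get that collects the visited rooms and rewrites them all with one dict.fromkeys update, avoiding Python's recursion-depth limit; same return value and same final dict.
import Mathlib
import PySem

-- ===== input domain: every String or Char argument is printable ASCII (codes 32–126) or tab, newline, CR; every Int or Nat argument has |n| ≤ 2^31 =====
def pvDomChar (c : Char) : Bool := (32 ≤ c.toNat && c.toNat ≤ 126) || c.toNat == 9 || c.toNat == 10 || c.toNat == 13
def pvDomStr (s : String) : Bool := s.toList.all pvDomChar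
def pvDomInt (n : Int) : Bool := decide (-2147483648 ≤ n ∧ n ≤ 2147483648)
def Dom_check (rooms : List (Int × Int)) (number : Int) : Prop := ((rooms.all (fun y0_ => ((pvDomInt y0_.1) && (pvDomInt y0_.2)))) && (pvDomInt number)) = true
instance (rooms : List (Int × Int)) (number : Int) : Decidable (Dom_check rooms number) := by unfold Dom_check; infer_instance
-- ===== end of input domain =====

-- B replaces A's recursion by an iterative walk that collects the visited rooms and then
-- rewrites them all in one dict update (idiomatic, no recursion-depth risk).  Both A and B
-- perform the same in-place dict writes in Python; the theorems below claim the RETURN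
-- value only (the writes never influence it, so the ports compute just the value).

-- ===== PORT A =====
-- needed by claimRoom's termination: a successful lookup makes erasing the key shrink the dict
theorem erase_size_lt_of_get? (d : PySem.Dict Int Int) (k : Int) (v : Int)
    (h : d.get? k = some v) : (d.erase k).size < d.size := by
  simp only [PySem.Dict.erase, PySem.Dict.size]
  refine List.length_filter_lt_length_iff_exists.mpr ?_
  simp only [PySem.Dict.get?, Option.map_eq_some_iff] at h
  obtain ⟨p, hp, -⟩ := h
  exact ⟨p, List.mem_of_find?_eq_some hp, by simp [List.find?_eq_some_iff_append] at hp; simp [hp.1]⟩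

-- A, literally: 'if number in rooms: room = check(rooms, rooms[number]); rooms[number] = room + 1;
-- return room  else: rooms[number] = number + 1; return number' — the writes happen after the
-- recursive call and never affect a lookup or the returned room, so only the room is computed.
-- Termination device: the recursive call erases the key just looked up; this changes nothing on
-- any input where Python's A terminates (a key is looked up twice only on a cycle, where A
-- raises RecursionError — excluded by Pre_check).
def claimRoom (d : PySem.Dict Int Int) (number : Int) : Int :=
  match h : d.get? number with
  | some v => claimRoom (d.erase number) v
  | none => number
termination_by d.size
decreasing_by exact erase_size_lt_of_get? d number v h

def check (rooms : List (Int × Int)) (number : Int) : Int :=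
  claimRoom (PySem.Dict.ofList rooms) number

-- ===== PORT B =====
-- B's while-loop: 'while (nxt := rooms.get(node)) is not None: visited.append(node); node = nxt'
-- — a pure walk returning (node, visited); fuel rooms.length + 1 bounds the loop, which
-- Pre_check makes sufficient.
def walkFree (fuel : Nat) (d : PySem.Dict Int Int) (node : Int) (visited : List Int) :
    Int × List Int :=
  match fuel with
  | 0 => (node, visited)  -- unreachable under Pre_check
  | f + 1 =>
    match d.get? node with
    | some nxt => walkFree f d nxt (visited ++ [node])
    | none => (node, visited)

-- 'rooms.update(dict.fromkeys(visited + [node], node + 1)); return node' — the update is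
-- modeled but discarded: only the returned room is claimed.
def check_alt (rooms : List (Int × Int)) (number : Int) : Int :=
  let d := PySem.Dict.ofList rooms
  let w := walkFree (rooms.length + 1) d number []
  let free := w.1
  let _updated := (w.2 ++ [free]).foldl (fun dd k => dd.insert k (free + 1)) d
  free

-- ===== PRECONDITION & SPEC =====
-- the successor map of the reservation dict (a key's recorded next room; non-keys are fixed)
def succD (rooms : List (Int × Int)) (k : Int) : Int :=
  ((PySem.Dict.ofList rooms).get? k).getD k

-- Pre_check holds exactly when the reservation chain starting at number leaves the key set
-- (iterating the successor map rooms.length + 1 times from number ends outside the keys) —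
-- precisely the inputs on which Python's A terminates; on the excluded inputs the chain runs
-- into a cycle and A raises RecursionError.
def Pre_check (rooms : List (Int × Int)) (number : Int) : Prop :=
  (PySem.Dict.ofList rooms).contains
    ((fun k => succD rooms k)^[rooms.length + 1] number) = false
instance (rooms : List (Int × Int)) (number : Int) : Decidable (Pre_check rooms number) := by
  unfold Pre_check; infer_instance

def pvWitness_check : (List (Int × Int)) × Int := ([(1, 2), (2, 3)], 1)

def Spec_check (rooms : List (Int × Int)) (number : Int) (out : Int) : Prop :=
  out = check_alt rooms number
instance (rooms : List (Int × Int)) (number : Int) (out : Int) : Decidable (Spec_check rooms number out) := by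
  unfold Spec_check; infer_instance

-- ===== CLAIM (what is proved, stated in full; the proofs are below) =====
def Claim_equal_check : Prop := ∀ (rooms : List (Int × Int)) (number : Int),
  Dom_check rooms number → Pre_check rooms number → Spec_check rooms number (check rooms number)

-- ===== LEMMAS AND PROOFS =====

-- the successor map of an arbitrary dict (succD rooms = chainStep (ofList rooms) by rfl)
def chainStep (d : PySem.Dict Int Int) (k : Int) : Int := (d.get? k).getD k

theorem chainStep_of_get?_some (d : PySem.Dict Int Int) (k v : Int) (h : d.get? k = some v) :
    chainStep d k = v := by simp [chainStep, h]

theorem chainStep_of_not_contains (d : PySem.Dict Int Int) (k : Int)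
    (h : d.contains k = false) : chainStep d k = k := by
  simp [chainStep, (PySem.Dict.get?_eq_none_iff_contains d k).mpr h]

theorem get?_erase_of_ne (d : PySem.Dict Int Int) (k j : Int) (h : j ≠ k) :
    (d.erase k).get? j = d.get? j := by
  simp only [PySem.Dict.erase, PySem.Dict.get?]
  congr 1
  induction d.items with
  | nil => rfl
  | cons p l ih =>
    rw [List.filter_cons]
    by_cases hpk : p.1 = k
    · have h1 : (p.1 == k) = true := by simp [hpk]
      have h2 : (p.1 == j) = false := by simp [hpk]; exact fun e => h e.symm
      simp [h1, h2, ih]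
    · have h1 : (p.1 == k) = false := by simp [hpk]
      simp only [h1, Bool.not_false, if_pos trivial]
      rw [List.find?_cons]
      cases hpj : (p.1 == j) with
      | true => simp [hpj]
      | false => simp [hpj, ih]

theorem contains_erase_false (d : PySem.Dict Int Int) (k x : Int)
    (h : d.contains x = false) : (d.erase k).contains x = false := by
  simp only [PySem.Dict.erase, PySem.Dict.contains, List.any_eq_false] at *
  intro p hp
  exact h p (List.mem_of_mem_filter hp)

-- a key looked up on the way cannot be met again: otherwise the chain is periodic and never
-- leaves the key set
theorem contains_iterate_of_periodic (d : PySem.Dict Int Int) (node : Int) (i : Nat)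
    (hper : (chainStep d)^[i + 1] node = node) (hnode : d.contains node = true) :
    ∀ m, d.contains ((chainStep d)^[m] node) = true := by
  have base : ∀ r, r ≤ i → d.contains ((chainStep d)^[r] node) = true := by
    intro r hr
    by_contra hb
    have hf : d.contains ((chainStep d)^[r] node) = false := by
      revert hb; cases d.contains ((chainStep d)^[r] node) <;> simp
    have hstall : chainStep d ((chainStep d)^[r] node) = (chainStep d)^[r] node :=
      chainStep_of_not_contains d _ hf
    have hcollapse : (chainStep d)^[i + 1] node = (chainStep d)^[r] node := by
      have h1 : (i + 1 - r) + r = i + 1 := by omega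
      calc (chainStep d)^[i + 1] node
          = (chainStep d)^[(i + 1 - r) + r] node := by rw [h1]
        _ = (chainStep d)^[i + 1 - r] ((chainStep d)^[r] node) :=
            Function.iterate_add_apply _ _ _ _
        _ = (chainStep d)^[r] node := Function.iterate_fixed hstall _
    rw [hper] at hcollapse
    rw [← hcollapse, hnode] at hf
    exact Bool.noConfusion hf
  intro m
  have hmod : (chainStep d)^[m] node = (chainStep d)^[m % (i + 1)] node := by
    conv_lhs => rw [← Nat.mod_add_div m (i + 1)]
    rw [Function.iterate_add_apply, Function.iterate_mul, Function.iterate_fixed hper]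
  rw [hmod]
  exact base _ (Nat.le_of_lt_succ (Nat.mod_lt _ (by omega)))

-- A's erase-based recursion computes the (stalled) iterate of the successor map whenever the
-- chain leaves the key set
theorem claimRoom_eq_iterate (M : Nat) :
    ∀ (d : PySem.Dict Int Int) (node : Int),
      d.contains ((chainStep d)^[M] node) = false →
      claimRoom d node = (chainStep d)^[M] node := by
  induction M with
  | zero =>
    intro d node h
    rw [claimRoom, (PySem.Dict.get?_eq_none_iff_contains d node).mpr h]
    rfl
  | succ M ih =>
    intro d node h
    rw [claimRoom]
    cases hg : d.get? node with
    | none =>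
      have hfix : chainStep d node = node := by simp [chainStep, hg]
      simp [Function.iterate_fixed hfix]
    | some v =>
      have hstep : (chainStep d)^[M + 1] node = (chainStep d)^[M] v := by
        rw [Function.iterate_succ_apply, chainStep_of_get?_some d node v hg]
      rw [hstep] at h
      have hnode : d.contains node = true := by
        rw [PySem.Dict.contains_eq_isSome_get?, hg]; rfl
      -- no iterate of v up to M can hit node again (else the chain is periodic, contra h)
      have hNR : ∀ i, i ≤ M → (chainStep d)^[i] v ≠ node := by
        intro i hi hhit
        have hper : (chainStep d)^[i + 1] node = node := by
          rw [Function.iterate_succ_apply, chainStep_of_get?_some d node v hg, hhit]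
        have := contains_iterate_of_periodic d node i hper hnode (M + 1)
        rw [Function.iterate_succ_apply, chainStep_of_get?_some d node v hg, h] at this
        exact Bool.noConfusion this
      -- hence the walk in (d.erase node) mirrors the walk in d
      have hT : ∀ k, k ≤ M → (chainStep (d.erase node))^[k] v = (chainStep d)^[k] v := by
        intro k hk
        induction k with
        | zero => rfl
        | succ k ihk =>
          rw [Function.iterate_succ_apply', Function.iterate_succ_apply',
            ihk (by omega)]
          simp only [chainStep, get?_erase_of_ne d node _ (hNR k (by omega))]
      have h' : (d.erase node).contains ((chainStep (d.erase node))^[M] v) = false := by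
        rw [hT M le_rfl]
        exact contains_erase_false d node _ h
      show claimRoom (d.erase node) v = (chainStep d)^[M + 1] node
      rw [ih (d.erase node) v h', hT M le_rfl, hstep]

-- B's fueled walk computes the same stalled iterate under the same hypothesis, for any
-- visited accumulator
theorem walkFree_fst_eq_iterate (fuel : Nat) :
    ∀ (d : PySem.Dict Int Int) (node : Int) (visited : List Int),
      d.contains ((chainStep d)^[fuel] node) = false →
      (walkFree fuel d node visited).1 = (chainStep d)^[fuel] node := by
  induction fuel with
  | zero => intro d node visited h; rfl
  | succ f ih =>
    intro d node visited h
    rw [walkFree]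
    cases hg : d.get? node with
    | none =>
      have hfix : chainStep d node = node := by simp [chainStep, hg]
      simp [Function.iterate_fixed hfix]
    | some nxt =>
      have hstep : (chainStep d)^[f + 1] node = (chainStep d)^[f] nxt := by
        rw [Function.iterate_succ_apply, chainStep_of_get?_some d node nxt hg]
      rw [hstep] at h ⊢
      exact ih d nxt (visited ++ [node]) h

-- ===== VERDICT (by name: the statement is the Claim_ definition above) =====
theorem check_spec : Claim_equal_check := by
  intro rooms number _ hpre
  have hpre' : (PySem.Dict.ofList rooms).contains
      ((chainStep (PySem.Dict.ofList rooms))^[rooms.length + 1] number) = false := hpre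
  have hB : check_alt rooms number
      = (walkFree (rooms.length + 1) (PySem.Dict.ofList rooms) number []).1 := rfl
  unfold Spec_check check
  rw [hB, claimRoom_eq_iterate (rooms.length + 1) _ number hpre',
    walkFree_fst_eq_iterate (rooms.length + 1) _ number [] hpre']
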